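-- pv_equiv track=rewrite | github.com/Marigleta/Simplon | Brief SimplonSearch-Copy1.py | lettre_ajoutee
-- ===== SOURCE A (Python) =====
-- def comb(mot):
--     combinaisons = []
--     for i in range(len(mot)):
--         combinaisons.append(mot[:i]+mot[i+1:])
--     return combinaisons
--
-- def lettre_ajoutee(mot, s):
--     occurrences = []
--     mots = s.split()
--     for i in mots:
--         #mot trouvé:
--         combinaisons = comb(i)
--         if mot in combinaisons:
--             occurrences.append(i)
--     return occurrences
-- ===== SOURCE B (Python) =====
-- def _is_del(mot, w):
--     # two-pointer: advance past the common prefix, then the rest of w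
--     # (skipping one char) must equal the rest of mot
--     i = 0
--     n = len(mot)
--     while i < n and w[i] == mot[i]:
--         i += 1
--     return w[i + 1:] == mot[i:]
--
-- def lettre_ajoutee(mot, s):
--     n1 = len(mot) + 1
--     return [w for w in s.split() if len(w) == n1 and _is_del(mot, w)]
-- ===== Notes on version B (the rewrite author's own statement) =====
-- stated objective: faster
-- what changed: Instead of materialising every one-letter deletion of each word and testing list membership of mot, B keeps only words of length len(mot)+1 and runs a two-pointer one-deletion check (common prefix, then suffix comparison) per word.
import Mathlib
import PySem

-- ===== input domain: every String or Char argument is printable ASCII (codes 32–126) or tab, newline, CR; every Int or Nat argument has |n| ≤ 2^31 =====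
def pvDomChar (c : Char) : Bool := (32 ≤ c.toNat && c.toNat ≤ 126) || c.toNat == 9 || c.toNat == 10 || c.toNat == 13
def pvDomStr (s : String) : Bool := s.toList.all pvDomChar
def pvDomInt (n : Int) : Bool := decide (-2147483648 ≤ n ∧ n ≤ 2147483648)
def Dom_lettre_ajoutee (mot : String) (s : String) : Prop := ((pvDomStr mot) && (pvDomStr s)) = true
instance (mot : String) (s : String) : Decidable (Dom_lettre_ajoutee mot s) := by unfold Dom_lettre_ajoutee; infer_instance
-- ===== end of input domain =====

-- B replaces A's "build every one-letter deletion of each word and test list membership"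
-- with a per-word two-pointer one-deletion check (length test + common prefix + suffix
-- comparison); same return value, O(n·L) instead of O(n·L²).

-- ===== PORT A =====
-- comb(mot): all strings obtained by deleting one position
def combA (w : List Char) : List (List Char) :=
  (PySem.List.pyRange 0 (w.length : Int) 1).foldl
    (fun acc i => acc ++ [PySem.List.slice w none (some i) ++ PySem.List.slice w (some (i + 1)) none]) []

def lettre_ajoutee (mot : String) (s : String) : List String :=
  (PySem.Str.split₀ s).foldl
    (fun acc w => if mot.toList ∈ combA w.toList then acc ++ [w] else acc) []

-- ===== PORT B =====
-- _is_del(mot, w): advance past the common prefix, then w minus one char must equal the rest of mot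
def oneDel : List Char → List Char → Bool
  | [], _ => true                                   -- w[i+1:] == "" == mot[i:]
  | _ :: _, [] => false                             -- unreachable under the length test
  | mc :: mt, wc :: wt => if wc = mc then oneDel mt wt else decide (wt = mc :: mt)

def lettre_ajoutee_alt (mot : String) (s : String) : List String :=
  (PySem.Str.split₀ s).filter
    (fun w => w.toList.length == mot.toList.length + 1 && oneDel mot.toList w.toList)

-- ===== PRECONDITION & SPEC =====
def Spec_lettre_ajoutee (mot : String) (s : String) (out : List String) : Prop := out = lettre_ajoutee_alt mot s
instance (mot : String) (s : String) (out : List String) : Decidable (Spec_lettre_ajoutee mot s out) := by unfold Spec_lettre_ajoutee; infer_instance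

-- ===== CLAIM (what is proved, stated in full; the proofs are below) =====
def Claim_equal_lettre_ajoutee : Prop := ∀ (mot : String) (s : String), Dom_lettre_ajoutee mot s → Spec_lettre_ajoutee mot s (lettre_ajoutee mot s)

-- ===== LEMMAS AND PROOFS =====

lemma combA_eq (w : List Char) :
    combA w = (List.range w.length).map (fun k => w.take k ++ w.drop (k + 1)) := by
  unfold combA
  rw [PySem.List.pyRange_one]
  simp only [Int.sub_zero, Int.toNat_natCast, List.foldl_map]
  rw [show (fun (acc : List (List Char)) (k : Nat) =>
        acc ++ [PySem.List.slice w none (some (0 + (k : Int))) ++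
                PySem.List.slice w (some (0 + (k : Int) + 1)) none])
      = (fun acc k => acc ++ [w.take k ++ w.drop (k + 1)]) from ?_]
  · exact PySem.List.foldl_append_singleton_eq_map _ _ []
  · funext acc k
    have h1 : (0 : Int) + (k : Int) = ((k : Nat) : Int) := by ring
    have h2 : (k : Int) + 1 = (((k + 1 : Nat)) : Int) := by push_cast; ring
    rw [h1, h2, PySem.List.slice_to_natCast, PySem.List.slice_from_natCast]

lemma oneDel_cons_self (m : List Char) (c : Char) : oneDel m (c :: m) = true := by
  induction m generalizing c with
  | nil => rfl
  | cons mc mt ih =>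
    unfold oneDel
    split_ifs with h
    · exact ih mc
    · simp

lemma oneDel_of_delAt (w : List Char) :
    ∀ (m : List Char) (k : Nat), k < w.length → w.take k ++ w.drop (k + 1) = m →
    oneDel m w = true := by
  induction w with
  | nil => intro m k hk _; simp at hk
  | cons wc wt ih =>
    intro m k hk hm
    cases k with
    | zero =>
      simp only [List.take_zero, List.nil_append, List.drop_succ_cons, List.drop_zero] at hm
      subst hm
      exact oneDel_cons_self _ _
    | succ j =>
      simp only [List.take_succ_cons, List.drop_succ_cons, List.cons_append] at hm
      subst hm
      unfold oneDel
      rw [if_pos rfl]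
      exact ih _ j (by simpa using hk) rfl

lemma delAt_of_oneDel (m : List Char) :
    ∀ (w : List Char), w.length = m.length + 1 → oneDel m w = true →
    ∃ k, k < w.length ∧ w.take k ++ w.drop (k + 1) = m := by
  induction m with
  | nil =>
    intro w hlen _
    refine ⟨0, by omega, ?_⟩
    cases w with
    | nil => simp at hlen
    | cons c t => simp at hlen ⊢; omega
  | cons mc mt ih =>
    intro w hlen hd
    cases w with
    | nil => simp at hlen
    | cons wc wt =>
      unfold oneDel at hd
      split_ifs at hd with h
      · obtain ⟨k, hk, hdel⟩ := ih wt (by simpa using hlen) hd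
        refine ⟨k + 1, by simpa using Nat.succ_lt_succ hk, ?_⟩
        simp only [List.take_succ_cons, List.drop_succ_cons, List.cons_append, h, hdel]
      · refine ⟨0, by omega, ?_⟩
        simp only [decide_eq_true_eq] at hd
        simpa using hd

lemma mem_combA_iff (m w : List Char) :
    m ∈ combA w ↔ (w.length = m.length + 1 ∧ oneDel m w = true) := by
  rw [combA_eq]
  simp only [List.mem_map, List.mem_range]
  constructor
  · rintro ⟨k, hk, rfl⟩
    constructor
    · have := List.length_take_of_le (l := w) (i := k) (by omega)
      simp only [List.length_append, this, List.length_drop]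
      omega
    · exact oneDel_of_delAt w _ k hk rfl
  · rintro ⟨hlen, hd⟩
    obtain ⟨k, hk, hdel⟩ := delAt_of_oneDel m w hlen hd
    exact ⟨k, hk, hdel⟩

lemma foldl_filter_key (mot : String) :
    ∀ (L : List String) (acc : List String),
    L.foldl (fun acc w => if mot.toList ∈ combA w.toList then acc ++ [w] else acc) acc
      = acc ++ L.filter (fun w => w.toList.length == mot.toList.length + 1 && oneDel mot.toList w.toList) := by
  intro L
  induction L with
  | nil => intro acc; simp
  | cons w t ih =>
    intro acc
    simp only [List.foldl_cons, List.filter_cons]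
    by_cases h : mot.toList ∈ combA w.toList
    · have hb : (w.toList.length == mot.toList.length + 1 && oneDel mot.toList w.toList) = true := by
        rcases (mem_combA_iff mot.toList w.toList).mp h with ⟨h1, h2⟩
        simp [h1, h2]
      rw [if_pos h, hb, ih]
      simp
    · have hb : (w.toList.length == mot.toList.length + 1 && oneDel mot.toList w.toList) = false := by
        by_contra hc
        apply h
        rw [mem_combA_iff]
        have := eq_true_of_ne_false hc
        simp only [Bool.and_eq_true, beq_iff_eq] at this
        exact this
      rw [if_neg h, hb, ih]
      simp

-- ===== VERDICT (by name: the statement is the Claim_ definition above) =====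
theorem lettre_ajoutee_spec : Claim_equal_lettre_ajoutee := by
  intro mot s _
  unfold Spec_lettre_ajoutee lettre_ajoutee lettre_ajoutee_alt
  rw [foldl_filter_key mot (PySem.Str.split₀ s) []]
  simp
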